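-- pv_equiv track=rewrite | github.com/oldgit/advent | day01.py | calibration
-- ===== SOURCE A (Python) =====
-- def calibration(line, digitMap):
--     start = None
--     end = None
--     for i, _ in enumerate(line):
--         for key, val in digitMap.items():
--             if line[i:].startswith(key):
--                 if start is None:
--                     start = val
--                 end = val
--     return (start * 10) + end
-- ===== SOURCE B (Python) =====
-- def calibration(line, digitMap):
--     items = list(digitMap.items())
--     n = len(line)
--     start = None
--     for i in range(n):
--         for key, val in items:
--             if line.startswith(key, i):
--                 start = val
--                 break
--         if start is not None:
--             break
--     end = None
--     for i in reversed(range(n)):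
--         for key, val in items:
--             if line.startswith(key, i):
--                 end = val
--         if end is not None:
--             break
--     return start * 10 + end
-- ===== Notes on version B (the rewrite author's own statement) =====
-- stated objective: alternative
-- what changed: A makes one accumulating pass over every position updating both start and end for every matching key; B splits the work into two early-exit passes: a forward scan that breaks at the first matching position/key for start, and a backward scan that breaks at the rightmost matching position (taking the last matching key there) for end.
import Mathlib
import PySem

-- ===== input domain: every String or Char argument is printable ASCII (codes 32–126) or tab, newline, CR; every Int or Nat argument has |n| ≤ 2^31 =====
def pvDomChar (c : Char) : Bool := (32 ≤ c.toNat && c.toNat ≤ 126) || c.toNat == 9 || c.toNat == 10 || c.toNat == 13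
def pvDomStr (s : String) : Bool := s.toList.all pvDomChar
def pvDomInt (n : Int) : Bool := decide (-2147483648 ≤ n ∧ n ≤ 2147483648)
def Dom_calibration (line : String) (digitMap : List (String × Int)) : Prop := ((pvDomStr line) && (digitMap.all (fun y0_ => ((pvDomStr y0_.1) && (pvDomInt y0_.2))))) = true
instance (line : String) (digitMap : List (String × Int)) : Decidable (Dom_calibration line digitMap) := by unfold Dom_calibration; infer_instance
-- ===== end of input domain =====

-- B replaces A's single accumulating pass over all positions by two early-exit passes
-- (forward first-match for start, backward last-match for end); objective: alternative.

-- ===== PORT A =====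
-- inner loop: 'for key, val in digitMap.items(): if line[i:].startswith(key): …'
def calibStep (cs : List Char) (items : List (String × Int)) (i : Nat)
    (st : Option Int × Option Int) : Option Int × Option Int :=
  items.foldl (fun st p =>
    if PySem.Chars.startswith (PySem.List.slice cs (some (i : Int)) none) p.1.toList then
      ((if st.1.isNone then some p.2 else st.1), some p.2)
    else st) st

def calibration (line : String) (digitMap : List (String × Int)) : Int :=
  let cs := line.toList
  let items := (PySem.Dict.ofList digitMap).items
  -- 'for i, _ in enumerate(line)': only the index i is used
  let st := (List.range cs.length).foldl (fun st i => calibStep cs items i st) (none, none)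
  match st with
  | (some s, some e) => s * 10 + e
  | _ => 0   -- unreachable under Pre_calibration (Python raises TypeError here)

-- ===== PORT B =====
-- 'for key, val in items: if line.startswith(key, i): start = val; break'
-- (line.startswith(key, i) with 0 ≤ i ≤ len(line) is exact as startswith on the drop)
def firstKeyAt (cs : List Char) (items : List (String × Int)) (i : Nat) : Option Int :=
  items.findSome? (fun p => if PySem.Chars.startswith (cs.drop i) p.1.toList then some p.2 else none)

-- 'for key, val in items: if line.startswith(key, i): end = val'  (no break)
def lastKeyAt (cs : List Char) (items : List (String × Int)) (i : Nat) : Option Int :=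
  items.foldl (fun o p => if PySem.Chars.startswith (cs.drop i) p.1.toList then some p.2 else o) none

def calibration_alt (line : String) (digitMap : List (String × Int)) : Int :=
  let cs := line.toList
  let items := (PySem.Dict.ofList digitMap).items
  -- forward pass, break at the first position/key that matches
  let start := (List.range cs.length).findSome? (firstKeyAt cs items)
  -- backward pass ('for i in reversed(range(n))'), break at the first matching position
  let endv := (List.range cs.length).reverse.findSome? (lastKeyAt cs items)
  match start with
  | none => 0   -- unreachable under Pre_calibration (Python raises TypeError here)
  | some s =>
    match endv with
    | none => 0   -- unreachable under Pre_calibration (Python raises TypeError here)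
    | some e => s * 10 + e

-- ===== PRECONDITION & SPEC =====
-- Pre_ excludes exactly the inputs on which A raises TypeError (no dict key occurs
-- as a prefix at any position of the line, e.g. empty line or empty dict).
def Pre_calibration (line : String) (digitMap : List (String × Int)) : Prop :=
  ∃ i ∈ List.range line.toList.length, ∃ p ∈ (PySem.Dict.ofList digitMap).items,
    PySem.Chars.startswith (line.toList.drop i) p.1.toList = true
instance (line : String) (digitMap : List (String × Int)) : Decidable (Pre_calibration line digitMap) := by
  unfold Pre_calibration; infer_instance

def pvWitness_calibration : String × (List (String × Int)) := ("a1", [("1", 1)])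

def Spec_calibration (line : String) (digitMap : List (String × Int)) (out : Int) : Prop := out = calibration_alt line digitMap
instance (line : String) (digitMap : List (String × Int)) (out : Int) : Decidable (Spec_calibration line digitMap out) := by unfold Spec_calibration; infer_instance

-- ===== CLAIM (what is proved, stated in full; the proofs are below) =====
def Claim_equal_calibration : Prop := ∀ (line : String) (digitMap : List (String × Int)), Dom_calibration line digitMap → Pre_calibration line digitMap → Spec_calibration line digitMap (calibration line digitMap)

-- ===== LEMMAS AND PROOFS =====

-- the 'end' accumulator: starting the last-match fold from a instead of none
-- just puts a behind the none-start result
lemma foldl_lastSome {α β : Type} (c : α → Bool) (v : α → β) :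
    ∀ (l : List α) (a : Option β),
      l.foldl (fun o p => if c p then some (v p) else o) a
        = (l.foldl (fun o p => if c p then some (v p) else o) none).or a := by
  intro l
  induction l with
  | nil => intro a; simp
  | cons p t ih =>
    intro a
    by_cases h : c p = true
    · simp only [List.foldl_cons, if_pos h]
      rw [ih (some (v p))]
      cases ht : t.foldl (fun o p => if c p then some (v p) else o) none <;> simp
    · simp only [List.foldl_cons, if_neg h]
      exact ih a

-- A's inner loop over the dict items, as a pair fold, computes
-- (start orElse first-match, last-match orElse end)
lemma pair_eq {α β : Type} (c : α → Bool) (v : α → β) :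
    ∀ (l : List α) (s e : Option β),
      l.foldl (fun st p => if c p then ((if st.1.isNone then some (v p) else st.1), some (v p)) else st) (s, e)
        = (s.or (l.findSome? (fun p => if c p then some (v p) else none)),
           (l.foldl (fun o p => if c p then some (v p) else o) none).or e) := by
  intro l
  induction l with
  | nil => intro s e; simp
  | cons p t ih =>
    intro s e
    by_cases h : c p = true
    · simp only [List.foldl_cons, List.findSome?_cons, if_pos h]
      rw [ih, foldl_lastSome c v t (some (v p))]
      simp only [Prod.mk.injEq]
      constructor
      · cases s <;> simp
      · cases ht : t.foldl (fun o p => if c p then some (v p) else o) none <;> simp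
    · simp only [List.foldl_cons, List.findSome?_cons, if_neg h]
      exact ih s e

-- rewrite A's slice to the drop B uses
lemma calibStep_eq (cs : List Char) (items : List (String × Int)) (i : Nat) (s e : Option Int) :
    calibStep cs items i (s, e)
      = (s.or (firstKeyAt cs items i), (lastKeyAt cs items i).or e) := by
  unfold calibStep firstKeyAt lastKeyAt
  rw [PySem.List.slice_from_natCast]
  exact pair_eq (fun p => PySem.Chars.startswith (cs.drop i) p.1.toList) (·.2) items s e

-- A's outer loop over positions computes (first hit, last hit)
lemma outer_eq (cs : List Char) (items : List (String × Int)) :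
    ∀ (l : List Nat) (s e : Option Int),
      l.foldl (fun st i => calibStep cs items i st) (s, e)
        = (s.or (l.findSome? (firstKeyAt cs items)),
           (l.reverse.findSome? (lastKeyAt cs items)).or e) := by
  intro l
  induction l with
  | nil => intro s e; simp
  | cons i t ih =>
    intro s e
    simp only [List.foldl_cons, List.reverse_cons, List.findSome?_append,
      List.findSome?_cons, List.findSome?_nil]
    rw [calibStep_eq, ih]
    simp only [Prod.mk.injEq]
    constructor
    · cases s <;> cases hf : firstKeyAt cs items i <;> simp
    · cases ht : t.reverse.findSome? (lastKeyAt cs items) <;>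
        cases hl : lastKeyAt cs items i <;> simp

-- the two ports are equal on EVERY input (both fall back to 0 where Python raises)
lemma calibration_eq_alt (line : String) (digitMap : List (String × Int)) :
    calibration line digitMap = calibration_alt line digitMap := by
  unfold calibration calibration_alt
  simp only [outer_eq, Option.none_or, Option.or_none]
  cases List.findSome? (firstKeyAt line.toList (PySem.Dict.ofList digitMap).items)
      (List.range line.toList.length) <;>
    cases List.findSome? (lastKeyAt line.toList (PySem.Dict.ofList digitMap).items)
      (List.range line.toList.length).reverse <;> rfl

-- ===== VERDICT (by name: the statement is the Claim_ definition above) =====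
theorem calibration_spec : Claim_equal_calibration := by
  intro line digitMap _ _
  unfold Spec_calibration
  exact calibration_eq_alt line digitMap
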